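-- pv_equiv track=rewrite | github.com/ranhai613/FTL-MVEventTags | scripts/events.py | ajustText
-- ===== SOURCE A (Python) =====
-- CUSTOM_FONT = {
--     'fuel': '{',
--     'droneparts': '|',
--     'drones': '|',
--     'missiles': '}',
--     'scrap': '~',
--     'repair': '$',
--     'elite': '€',
--     'fire': '‰',
--     'power': '†',
--     'cooldown': '‡',
--     #'upgraded': '™'
-- }
--
-- def ajustText(text, use_custom_font = True):
--     if text is None:
--         return None
--
--     if use_custom_font:
--         text = text.lower()
--         for key, custom_font in CUSTOM_FONT.items():
--             text = text.replace(key, custom_font)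
--     return text.replace('_', ' ').title()
-- ===== SOURCE B (Python) =====
-- CUSTOM_FONT = {
--     'fuel': '{',
--     'droneparts': '|',
--     'drones': '|',
--     'missiles': '}',
--     'scrap': '~',
--     'repair': '$',
--     'elite': '€',
--     'fire': '‰',
--     'power': '†',
--     'cooldown': '‡',
-- }
--
-- def _apply_subs(s, items):
--     if not items:
--         return s
--     key, glyph = items[0]
--     return _apply_subs(s.replace(key, glyph), items[1:])
--
-- def ajustText(text, use_custom_font = True):
--     if text is None:
--         return None
--     if use_custom_font:
--         text = _apply_subs(text.lower(), list(CUSTOM_FONT.items()))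
--     # one fused scan: '_'->' ' and title-casing together
--     out = []
--     prev_cased = False
--     for c in text:
--         if c == '_':
--             c = ' '
--         if c.isalpha():
--             out.append(c.lower() if prev_cased else c.upper())
--             prev_cased = True
--         else:
--             out.append(c)
--             prev_cased = False
--     return ''.join(out)
-- ===== Notes on version B (the rewrite author's own statement) =====
-- stated objective: alternative
-- what changed: B folds the font substitutions by structural recursion over the item list and replaces the chained underscore-replace and title() passes with one fused character scan carrying a previous-char-cased state; a single-pass regex was rejected because it is not equivalent to the sequential replaces when key occurrences overlap.
import Mathlib
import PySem

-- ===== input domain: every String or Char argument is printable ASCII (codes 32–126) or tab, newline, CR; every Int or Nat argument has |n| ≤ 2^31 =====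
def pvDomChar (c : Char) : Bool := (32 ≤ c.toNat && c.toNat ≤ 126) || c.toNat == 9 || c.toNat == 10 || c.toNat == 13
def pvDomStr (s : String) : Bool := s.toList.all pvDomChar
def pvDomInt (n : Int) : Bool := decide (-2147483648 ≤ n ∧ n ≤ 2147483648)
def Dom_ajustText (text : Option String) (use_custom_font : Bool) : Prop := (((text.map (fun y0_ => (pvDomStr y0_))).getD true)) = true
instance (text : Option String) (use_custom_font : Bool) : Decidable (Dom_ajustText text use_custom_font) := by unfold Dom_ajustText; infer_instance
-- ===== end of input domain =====

-- B replaces A's chained passes `.replace('_',' ').title()` by one fused character scan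
-- (carrying the previous-char-cased state) and folds the font substitutions by structural
-- recursion over the item list; objective: alternative (same exact behaviour, one fewer scan).

-- ===== PORT A =====
-- the module constant CUSTOM_FONT (a dict iterated in insertion order)
def customFontItems : List (String × String) :=
  [("fuel", "{"), ("droneparts", "|"), ("drones", "|"), ("missiles", "}"),
   ("scrap", "~"), ("repair", "$"), ("elite", "€"), ("fire", "‰"),
   ("power", "†"), ("cooldown", "‡")]

-- Python str.title(): uppercase a letter after a non-cased char, lowercase a letter after a
-- cased char (exact for the printable-ASCII inputs plus the substitution glyphs, which are
-- not cased; PySem has no title primitive, so it is ported by hand here)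
def pyTitleChars : List Char → Bool → List Char
  | [], _ => []
  | c :: rest, prevCased =>
    if PySem.Chars.isalpha c then
      (if prevCased then PySem.Chars.lowerChar c else PySem.Chars.upperChar c) :: pyTitleChars rest true
    else
      c :: pyTitleChars rest false

def ajustText (text : Option String) (use_custom_font : Bool) : Option String :=
  match text with
  | none => none
  | some t =>
    let t :=
      if use_custom_font then
        customFontItems.foldl (fun s kv => PySem.Str.replace s kv.1 kv.2) (PySem.Str.lower t)
      else t
    some (String.ofList (pyTitleChars (PySem.Str.replace t "_" " ").toList false))

-- ===== PORT B =====
-- recursion over the item list (B's _apply_subs)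
def applySubs (s : String) : List (String × String) → String
  | [] => s
  | (key, glyph) :: rest => applySubs (PySem.Str.replace s key glyph) rest

-- B's fused loop: state (out, prev_cased), '_'→' ' and title-casing in one scan
def fusedStep (st : List Char × Bool) (c0 : Char) : List Char × Bool :=
  let c := if c0 = '_' then ' ' else c0
  if PySem.Chars.isalpha c then
    (st.1 ++ [if st.2 then PySem.Chars.lowerChar c else PySem.Chars.upperChar c], true)
  else
    (st.1 ++ [c], false)

def ajustText_alt (text : Option String) (use_custom_font : Bool) : Option String :=
  match text with
  | none => none
  | some t =>
    let t :=
      if use_custom_font then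
        applySubs (PySem.Str.lower t) customFontItems
      else t
    some (String.ofList (t.toList.foldl fusedStep ([], false)).1)

-- ===== PRECONDITION & SPEC =====
def Spec_ajustText (text : Option String) (use_custom_font : Bool) (out : Option String) : Prop := out = ajustText_alt text use_custom_font
instance (text : Option String) (use_custom_font : Bool) (out : Option String) : Decidable (Spec_ajustText text use_custom_font out) := by unfold Spec_ajustText; infer_instance

-- ===== CLAIM (what is proved, stated in full; the proofs are below) =====
def Claim_equal_ajustText : Prop := ∀ (text : Option String) (use_custom_font : Bool), Dom_ajustText text use_custom_font → Spec_ajustText text use_custom_font (ajustText text use_custom_font)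

-- ===== LEMMAS AND PROOFS =====

-- the substitution recursion is the fold
theorem applySubs_eq_foldl (items : List (String × String)) (s : String) :
    applySubs s items = items.foldl (fun s kv => PySem.Str.replace s kv.1 kv.2) s := by
  induction items generalizing s with
  | nil => rfl
  | cons kv rest ih => cases kv; simp [applySubs, List.foldl, ih]

-- replacing the single char '_' by ' ' is a per-character map
theorem replace_underscore_go (fuel : Nat) (l acc : List Char) (h : l.length ≤ fuel) :
    PySem.Chars.replace.go ['_'] [' '] fuel l acc
      = acc.reverse ++ l.map (fun c => if c = '_' then ' ' else c) := by
  induction fuel generalizing l acc with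
  | zero =>
    cases l with
    | nil => simp [PySem.Chars.replace.go]
    | cons c t => simp at h
  | succ n ih =>
    cases l with
    | nil => simp [PySem.Chars.replace.go]
    | cons c t =>
      simp only [List.length_cons, Nat.succ_le_succ_iff] at h
      by_cases hc : c = '_'
      · subst hc
        rw [show PySem.Chars.replace.go ['_'] [' '] (n+1) ('_' :: t) acc
              = PySem.Chars.replace.go ['_'] [' '] n (List.drop 1 ('_' :: t)) ([' '].reverse ++ acc) by
            simp [PySem.Chars.replace.go, List.isPrefixOf]]
        simp [ih _ _ (by simpa using h)]
      · rw [show PySem.Chars.replace.go ['_'] [' '] (n+1) (c :: t) acc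
              = PySem.Chars.replace.go ['_'] [' '] n t (c :: acc) by
            simp [PySem.Chars.replace.go, List.isPrefixOf, Ne.symm hc]]
        simp [ih _ _ h, hc]

theorem replace_underscore (l : List Char) :
    PySem.Chars.replace l ['_'] [' '] = l.map (fun c => if c = '_' then ' ' else c) := by
  simpa [PySem.Chars.replace] using replace_underscore_go l.length l [] le_rfl

-- the fused fold computes title ∘ (map '_'→' '), for any carried state
theorem fused_eq_title (l : List Char) (out : List Char) (b : Bool) :
    (l.foldl fusedStep (out, b)).1
      = out ++ pyTitleChars (l.map (fun c => if c = '_' then ' ' else c)) b := by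
  induction l generalizing out b with
  | nil => simp [pyTitleChars]
  | cons c t ih =>
    by_cases hc : c = '_'
    · subst hc
      have hsp : PySem.Chars.isalpha ' ' = false := by decide
      simp [List.foldl, fusedStep, hsp, ih, pyTitleChars]
    · by_cases ha : PySem.Chars.isalpha (if c = '_' then ' ' else c) = true
      · simp only [hc, if_false] at ha ⊢
        simp [List.foldl, fusedStep, hc, ha, ih, pyTitleChars]
      · simp only [hc, if_false] at ha
        have ha' : PySem.Chars.isalpha c = false := by
          cases hx : PySem.Chars.isalpha c <;> simp_all
        simp [List.foldl, fusedStep, hc, ha', ih, pyTitleChars]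

-- the two tail pipelines agree on any string
theorem tail_eq (u : String) :
    String.ofList (pyTitleChars (PySem.Str.replace u "_" " ").toList false)
      = String.ofList ((u.toList.foldl fusedStep ([], false)).1) := by
  rw [fused_eq_title u.toList [] false]
  simp [PySem.Str.replace, replace_underscore]

-- ===== VERDICT (by name: the statement is the Claim_ definition above) =====
theorem ajustText_spec : Claim_equal_ajustText := by
  intro text use_custom_font _
  unfold Spec_ajustText ajustText ajustText_alt
  cases text with
  | none => rfl
  | some t =>
    dsimp only
    rw [applySubs_eq_foldl, tail_eq]
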